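-- pv_equiv track=rewrite | github.com/alestar/InterviewPrep | src/MyPython/PastInterview/CodeSignal/MonotonicArray.py | solution
-- ===== SOURCE A (Python) =====
-- def solution(arr):
--     n = len(arr)
--     result = []
--
--     for i in range(n - 2):
--         if (arr[i] < arr[i + 1] < arr[i + 2]) or (arr[i] > arr[i + 1] > arr[i + 2]):
--             result.append(1)
--         else:
--             result.append(0)
--
--     return result
-- ===== SOURCE B (Python) =====
-- def _signs(arr):
--     # phase 1: adjacent comparison signs
--     return [(1 if y > x else -1 if y < x else 0) for x, y in zip(arr, arr[1:])]
--
-- def solution(arr):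
--     # phase 2: scan the sign list for equal consecutive nonzero signs
--     d = _signs(arr)
--     return [1 if s != 0 and s == t else 0 for s, t in zip(d, d[1:])]
-- ===== Notes on version B (the rewrite author's own statement) =====
-- stated objective: alternative
-- what changed: Replaces the indexed triple-comparison loop by a two-phase decomposition: first materialize the list of adjacent comparison signs, then scan that sign list for equal consecutive nonzero signs.
import Mathlib
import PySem

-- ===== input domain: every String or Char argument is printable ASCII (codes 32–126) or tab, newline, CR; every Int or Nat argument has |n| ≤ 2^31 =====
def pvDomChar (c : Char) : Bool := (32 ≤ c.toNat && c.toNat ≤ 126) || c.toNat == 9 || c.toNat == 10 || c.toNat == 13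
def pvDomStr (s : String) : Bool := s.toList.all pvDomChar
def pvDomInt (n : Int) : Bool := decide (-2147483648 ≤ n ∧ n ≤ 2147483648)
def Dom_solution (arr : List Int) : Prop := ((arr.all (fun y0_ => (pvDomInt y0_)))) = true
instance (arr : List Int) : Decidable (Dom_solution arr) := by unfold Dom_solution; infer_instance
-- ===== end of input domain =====

-- B replaces A's indexed triple-comparison loop by a two-phase decomposition
-- (adjacent-sign list, then a consecutive-equal-nonzero scan); objective: alternative.

-- ===== PORT A =====
def solution (arr : List Int) : List Int :=
  let n : Int := arr.length
  (PySem.List.pyRange 0 (n - 2) 1).foldl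
    (fun result i =>
      let a := PySem.List.pyGetD arr i 0
      let b := PySem.List.pyGetD arr (i + 1) 0
      let c := PySem.List.pyGetD arr (i + 2) 0
      result ++ [if (a < b ∧ b < c) ∨ (a > b ∧ b > c) then (1 : Int) else 0]) []

-- ===== PORT B =====
-- zip(arr, arr[1:]) ported as arr.zip arr.tail (PySem.List.slice_from_one: arr[1:] = arr.tail)
def pvSigns (arr : List Int) : List Int :=
  (arr.zip arr.tail).map
    (fun p => if p.2 > p.1 then (1 : Int) else if p.2 < p.1 then -1 else 0)

def solution_alt (arr : List Int) : List Int :=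
  ((pvSigns arr).zip (pvSigns arr).tail).map
    (fun p => if p.1 ≠ 0 ∧ p.1 = p.2 then (1 : Int) else 0)

-- ===== PRECONDITION & SPEC =====
def Spec_solution (arr : List Int) (out : List Int) : Prop := out = solution_alt arr
instance (arr : List Int) (out : List Int) : Decidable (Spec_solution arr out) := by unfold Spec_solution; infer_instance

-- ===== CLAIM (what is proved, stated in full; the proofs are below) =====
def Claim_equal_solution : Prop := ∀ (arr : List Int), Dom_solution arr → Spec_solution arr (solution arr)

-- ===== LEMMAS AND PROOFS =====

theorem pv_main (arr : List Int) : solution arr = solution_alt arr := by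
  unfold solution solution_alt pvSigns
  rw [PySem.List.foldl_append_singleton_eq_map]
  apply List.ext_getElem
  · simp [PySem.List.length_pyRange_one, List.length_zip, List.length_tail]
    omega
  · intro i h1 h2
    simp only [List.nil_append, List.getElem_map, PySem.List.getElem_pyRange_one,
      List.getElem_zip, List.getElem_tail, zero_add]
    have hlen : i + 2 < arr.length := by
      simp [PySem.List.length_pyRange_one] at h1; omega
    rw [show ((i : Nat) : Int) + 1 = ((i + 1 : Nat) : Int) by push_cast; ring,
        show ((i : Nat) : Int) + 2 = ((i + 2 : Nat) : Int) by push_cast; ring]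
    simp only [show i + 1 + 1 = i + 2 from by omega]
    simp only [PySem.List.pyGetD_natCast]
    rw [List.getD_eq_getElem _ _ (by omega), List.getD_eq_getElem _ _ (by omega),
        List.getD_eq_getElem _ _ (by omega)]
    rcases lt_trichotomy arr[i] arr[i+1] with ha|ha|ha <;>
      rcases lt_trichotomy arr[i+1] arr[i+2] with hb|hb|hb <;>
      simp_all <;> omega

-- ===== VERDICT (by name: the statement is the Claim_ definition above) =====
theorem solution_spec : Claim_equal_solution := by
  intro arr _
  unfold Spec_solution
  exact pv_main arr
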